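-- pv_equiv track=rewrite | github.com/mkvakan/RS-vjezbe | NinoTelefonino/Nino.py | CistiBroj
-- ===== SOURCE A (Python) =====
-- def CistiBroj(Broj: str)->str:
--     Cisti = ""
--
--     for Znak in Broj:
--         if Znak == "+" and len(Cisti) == 0:
--             continue
--         elif Znak in ["(", ")", "-", "/"] or Znak.isspace():
--             continue
--         elif Znak.isdigit():
--             Cisti += Znak
--         else:
--             return None
--
--     return Cisti
-- ===== SOURCE B (Python) =====
-- def CistiBroj(Broj: str) -> str:
--     i = next((k for k, c in enumerate(Broj) if c.isdigit()), len(Broj))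
--     head, tail = Broj[:i], Broj[i:]
--     if not all(c == "+" or c in "()-/" or c.isspace() for c in head):
--         return None
--     if not all(c.isdigit() or c in "()-/" or c.isspace() for c in tail):
--         return None
--     return "".join(c for c in Broj if c.isdigit())
-- ===== Notes on version B (the rewrite author's own statement) =====
-- stated objective: alternative
-- what changed: A's single stateful loop (skip '+' only while the accumulator is empty, early-return None) is replaced by splitting the string at its first digit, validating the head ('+'/separators/space) and tail (digits/separators/space, no '+') separately, and returning the digits filtered out in one pass.
import Mathlib
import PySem

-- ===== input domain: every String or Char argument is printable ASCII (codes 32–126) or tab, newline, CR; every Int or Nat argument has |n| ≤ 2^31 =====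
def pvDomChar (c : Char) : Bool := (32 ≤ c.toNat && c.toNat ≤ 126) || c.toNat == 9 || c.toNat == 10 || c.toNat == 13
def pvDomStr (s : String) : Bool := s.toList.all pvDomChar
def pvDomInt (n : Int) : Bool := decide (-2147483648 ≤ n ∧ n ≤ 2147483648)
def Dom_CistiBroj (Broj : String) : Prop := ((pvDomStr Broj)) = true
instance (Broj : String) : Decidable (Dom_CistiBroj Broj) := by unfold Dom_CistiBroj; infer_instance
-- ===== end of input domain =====

-- B replaces A's stateful skip/append loop by a split at the first digit with two validation passes and one digit filter; objective: alternative decomposition (same cost).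

-- ===== PORT A =====
-- literal transliteration of A's loop: acc = Cisti, early return None = none
def cistiLoopA : List Char → List Char → Option (List Char)
  | [], acc => some acc
  | c :: rest, acc =>
    if c = '+' ∧ acc.length = 0 then cistiLoopA rest acc
    else if c ∈ ['(', ')', '-', '/'] ∨ PySem.Chars.isspace c then cistiLoopA rest acc
    else if PySem.Chars.isdigit c then cistiLoopA rest (acc ++ [c])
    else none

def CistiBroj (Broj : String) : Option String :=
  (cistiLoopA Broj.toList []).map String.mk

-- ===== PORT B =====
-- Source B's character classes: allowed before the first digit / from the first digit on
def sepB (c : Char) : Bool := c == '(' || c == ')' || c == '-' || c == '/'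
def headOK (c : Char) : Bool := c == '+' || sepB c || PySem.Chars.isspace c
def tailOK (c : Char) : Bool := PySem.Chars.isdigit c || sepB c || PySem.Chars.isspace c

-- Source B: split Broj at the first digit (Broj[:i] / Broj[i:] with i the first digit's
-- index), validate the two halves, then join the digits; takeWhile/dropWhile at the
-- first digit IS that split.
def CistiBroj_alt (Broj : String) : Option String :=
  let cs := Broj.toList
  let head := cs.takeWhile (fun c => !PySem.Chars.isdigit c)
  let tail := cs.dropWhile (fun c => !PySem.Chars.isdigit c)
  if head.all headOK then
    if tail.all tailOK then some (String.mk (cs.filter PySem.Chars.isdigit))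
    else none
  else none

-- ===== PRECONDITION & SPEC =====
def Spec_CistiBroj (Broj : String) (out : Option String) : Prop := out = CistiBroj_alt Broj
instance (Broj : String) (out : Option String) : Decidable (Spec_CistiBroj Broj out) := by unfold Spec_CistiBroj; infer_instance

-- ===== CLAIM (what is proved, stated in full; the proofs are below) =====
def Claim_equal_CistiBroj : Prop := ∀ (Broj : String), Dom_CistiBroj Broj → Spec_CistiBroj Broj (CistiBroj Broj)

-- ===== LEMMAS AND PROOFS =====

theorem sepB_iff (c : Char) : sepB c = true ↔ c ∈ ['(', ')', '-', '/'] := by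
  simp [sepB]; tauto

theorem space_not_digit (c : Char) (h : PySem.Chars.isspace c = true) :
    PySem.Chars.isdigit c = false := by
  unfold PySem.Chars.isspace at h
  unfold PySem.Chars.isdigit
  simp only [Char.le_def, UInt32.le_iff_toNat_le, Char.toNat] at h ⊢
  simp at h ⊢
  omega

theorem sep_not_digit (c : Char) (h : sepB c = true) : PySem.Chars.isdigit c = false := by
  have h' : c = '(' ∨ c = ')' ∨ c = '-' ∨ c = '/' := by simpa using (sepB_iff c).mp h
  rcases h' with rfl | rfl | rfl | rfl <;> decide

-- a char skipped by A's separator branch is never a digit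
theorem skip_not_digit (c : Char) (h : c ∈ ['(', ')', '-', '/'] ∨ PySem.Chars.isspace c = true) :
    PySem.Chars.isdigit c = false := by
  rcases h with h | h
  · exact sep_not_digit c ((sepB_iff c).mpr h)
  · exact space_not_digit c h

-- a digit is skipped by neither of A's skip branches
theorem digit_not_skip (c : Char) (h : PySem.Chars.isdigit c = true) :
    ¬(c ∈ ['(', ')', '-', '/'] ∨ PySem.Chars.isspace c = true) := by
  intro hs
  rw [skip_not_digit c hs] at h
  exact Bool.false_ne_true h

-- tail phase: once the accumulator is nonempty, '+' is no longer skipped and the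
-- loop returns acc ++ digits iff every remaining char is tail-valid
theorem cistiLoopA_nonempty (cs : List Char) : ∀ (a : Char) (as : List Char),
    cistiLoopA cs (a :: as) =
      if cs.all tailOK then some ((a :: as) ++ cs.filter PySem.Chars.isdigit) else none := by
  induction cs with
  | nil => intro a as; simp [cistiLoopA]
  | cons c rest ih =>
    intro a as
    by_cases hd : PySem.Chars.isdigit c = true
    · have hsep := digit_not_skip c hd
      have h1 : ¬(c = '+' ∧ (a :: as).length = 0) := by simp
      have ht : tailOK c = true := by simp [tailOK, hd]
      show (if _ then _ else _) = _
      rw [if_neg h1, if_neg hsep, if_pos hd]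
      rw [show (a :: as) ++ [c] = a :: (as ++ [c]) from rfl, ih a (as ++ [c])]
      simp [List.all_cons, ht, List.filter_cons, hd]
    · by_cases hs : c ∈ ['(', ')', '-', '/'] ∨ PySem.Chars.isspace c = true
      · have ht : tailOK c = true := by
          rcases hs with h | h
          · simp [tailOK, (sepB_iff c).mpr h]
          · simp [tailOK, h]
        have h1 : ¬(c = '+' ∧ (a :: as).length = 0) := by simp
        show (if _ then _ else _) = _
        rw [if_neg h1, if_pos hs]
        rw [ih a as]
        simp [List.all_cons, ht, List.filter_cons, hd]
      · rw [not_or] at hs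
        have hsep : sepB c = false := by
          by_cases h : sepB c = true
          · exact absurd ((sepB_iff c).mp h) hs.1
          · simpa using h
        have ht : tailOK c = false := by
          simp [tailOK, hd, hsep, hs.2]
        have hs : ¬(c ∈ ['(', ')', '-', '/'] ∨ PySem.Chars.isspace c = true) := by
          rintro (h | h)
          · exact hs.1 h
          · exact hs.2 h
        have hp : ¬(c = '+' ∧ (a :: as).length = 0) := by simp
        show (if _ then _ else _) = _
        rw [if_neg hp, if_neg hs, if_neg hd]
        simp [List.all_cons, ht]

-- head phase (accumulator empty), characterising A's loop as B's computation
theorem cistiLoopA_empty (cs : List Char) :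
    cistiLoopA cs [] =
      if (cs.takeWhile (fun c => !PySem.Chars.isdigit c)).all headOK then
        if (cs.dropWhile (fun c => !PySem.Chars.isdigit c)).all tailOK then
          some (cs.filter PySem.Chars.isdigit)
        else none
      else none := by
  induction cs with
  | nil => simp [cistiLoopA]
  | cons c rest ih =>
    by_cases hd : PySem.Chars.isdigit c = true
    · have hsep := digit_not_skip c hd
      have hplus : ¬(c = '+' ∧ ([] : List Char).length = 0) := by
        rintro ⟨rfl, -⟩; revert hd; decide
      have ht : tailOK c = true := by simp [tailOK, hd]
      show (if _ then _ else _) = _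
      rw [if_neg hplus, if_neg hsep, if_pos hd]
      rw [show ([] : List Char) ++ [c] = [c] from rfl, cistiLoopA_nonempty rest c []]
      simp [List.takeWhile_cons, List.dropWhile_cons, hd, List.all_cons, ht,
        List.filter_cons]
    · by_cases hh : headOK c = true
      · have hbranch : cistiLoopA (c :: rest) [] = cistiLoopA rest [] := by
          by_cases hp : c = '+'
          · simp [cistiLoopA, hp]
          · have hs : c ∈ ['(', ')', '-', '/'] ∨ PySem.Chars.isspace c = true := by
              by_cases hsep : sepB c = true
              · exact Or.inl ((sepB_iff c).mp hsep)
              by_cases hsp : PySem.Chars.isspace c = true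
              · exact Or.inr hsp
              · exact absurd hh
                  (by simp [headOK, hp]
                      exact ⟨by simpa using hsep, by simpa using hsp⟩)
            have h1 : ¬(c = '+' ∧ ([] : List Char).length = 0) := by simp [hp]
            show (if _ then _ else _) = _
            rw [if_neg h1, if_pos hs]
        rw [hbranch, ih]
        simp [List.takeWhile_cons, List.dropWhile_cons, hd, List.all_cons, hh,
          List.filter_cons]
      · have hp : ¬(c = '+' ∧ ([] : List Char).length = 0) := by
          rintro ⟨rfl, -⟩; revert hh; decide
        have hs : ¬(c ∈ ['(', ')', '-', '/'] ∨ PySem.Chars.isspace c = true) := by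
          rintro (h | h)
          · exact hh (by simp [headOK, (sepB_iff c).mpr h])
          · exact hh (by simp [headOK, h])
        show (if _ then _ else _) = _
        rw [if_neg hp, if_neg hs, if_neg hd]
        simp [List.takeWhile_cons, hd, List.all_cons, hh]

-- ===== VERDICT (by name: the statement is the Claim_ definition above) =====
theorem CistiBroj_spec : Claim_equal_CistiBroj := by
  intro Broj _
  unfold Spec_CistiBroj CistiBroj CistiBroj_alt
  rw [cistiLoopA_empty]
  split_ifs <;> simp_all
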